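-- pv_equiv track=rewrite | github.com/jamiegs/whats-at | src/whats-at-abes/page_renderer/dataaccess.py | bold_description_labels
-- ===== SOURCE A (Python) =====
-- def bold_description_labels(description):
--     valid_labels = [
--         'allergies:',
--         'dynamite:',
--         'dynamite sauce:',
--         'burn mix:',
--         'marley sauce:'
--     ]
--     for valid_label in valid_labels:
--         if valid_label in description:
--             description = description.replace(valid_label, f'<br /><strong>{valid_label}</strong>')
--
--     return description
-- ===== SOURCE B (Python) =====
-- def bold_description_labels(description):
--     valid_labels = [
--         'allergies:',
--         'dynamite:',
--         'dynamite sauce:',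
--         'burn mix:',
--         'marley sauce:'
--     ]
--     out = []
--     i = 0
--     n = len(description)
--     while i < n:
--         for label in valid_labels:
--             if description.startswith(label, i):
--                 out.append('<br /><strong>' + label + '</strong>')
--                 i += len(label)
--                 break
--         else:
--             out.append(description[i])
--             i += 1
--     return ''.join(out)
-- ===== Notes on version B (the rewrite author's own statement) =====
-- stated objective: alternative
-- what changed: Replaced the five sequential str.replace passes with a single left-to-right scan that tries each label at every position and emits the wrapped label or the current character once, joining the pieces at the end.
import Mathlib
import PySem

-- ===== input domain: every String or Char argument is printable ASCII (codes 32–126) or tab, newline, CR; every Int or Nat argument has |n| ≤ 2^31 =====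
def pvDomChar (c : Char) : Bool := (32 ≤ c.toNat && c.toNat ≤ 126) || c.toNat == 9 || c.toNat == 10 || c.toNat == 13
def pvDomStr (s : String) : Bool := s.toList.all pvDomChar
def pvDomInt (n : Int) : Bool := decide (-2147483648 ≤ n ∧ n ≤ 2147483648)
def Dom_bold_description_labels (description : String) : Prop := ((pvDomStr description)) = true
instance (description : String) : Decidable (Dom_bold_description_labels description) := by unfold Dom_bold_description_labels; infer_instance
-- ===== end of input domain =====

-- B replaces A's five sequential str.replace passes with one left-to-right scan that tries each
-- label at every position and wraps a match once (objective: alternative single-pass algorithm).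

-- ===== PORT A =====
-- the five labels of A's valid_labels, in order
def pvValidLabels : List String :=
  ["allergies:", "dynamite:", "dynamite sauce:", "burn mix:", "marley sauce:"]

-- A: for each label in order, if it occurs, replace every occurrence by the wrapped label
def bold_description_labels (description : String) : String :=
  pvValidLabels.foldl
    (fun d l =>
      if PySem.Str.isIn l d then
        PySem.Str.replace d l ("<br /><strong>" ++ l ++ "</strong>")
      else d)
    description

-- ===== PORT B =====
-- the same five labels, as char lists (Source B's valid_labels)
def pvLabelsC : List (List Char) :=
  ["allergies:".toList, "dynamite:".toList, "dynamite sauce:".toList,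
   "burn mix:".toList, "marley sauce:".toList]

-- Source B's wrapped piece '<br /><strong>' + label + '</strong>'
def pvWrapC (l : List Char) : List Char :=
  "<br /><strong>".toList ++ l ++ "</strong>".toList

-- every label is nonempty (cited by pvScan's termination proof)
theorem pvLabelsC_len : ∀ l ∈ pvLabelsC, 1 ≤ l.length := by decide

-- Source B's while loop: at each position try the labels in order (the for/break);
-- on a match emit the wrapped label and jump past it, otherwise emit the char and step
def pvScan : List Char → List Char
  | [] => []
  | c :: t =>
    match h : pvLabelsC.find? (fun l => l.isPrefixOf (c :: t)) with
    | some l => pvWrapC l ++ pvScan ((c :: t).drop l.length)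
    | none => c :: pvScan t
  termination_by cs => cs.length
  decreasing_by
  · have hm := pvLabelsC_len l (List.mem_of_find?_eq_some h)
    have hb := List.find?_some (p := fun l : List Char => l.isPrefixOf (c :: t)) h
    have hp := (List.isPrefixOf_iff_prefix.mp hb).length_le
    simp only [List.length_drop, List.length_cons] at *
    omega
  · simp

-- ''.join(out) of the emitted pieces is the concatenation of their characters
def bold_description_labels_alt (description : String) : String :=
  String.ofList (pvScan description.toList)

-- ===== PRECONDITION & SPEC =====
def Spec_bold_description_labels (description : String) (out : String) : Prop := out = bold_description_labels_alt description
instance (description : String) (out : String) : Decidable (Spec_bold_description_labels description out) := by unfold Spec_bold_description_labels; infer_instance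

-- ===== CLAIM (what is proved, stated in full; the proofs are below) =====
def Claim_equal_bold_description_labels : Prop := ∀ (description : String), Dom_bold_description_labels description → Spec_bold_description_labels description (bold_description_labels description)

-- ===== LEMMAS AND PROOFS =====

-- scan generalized to an arbitrary label list (proof device; drop (l.length-1) of the tail
-- equals dropping l.length from c::t whenever l is nonempty, which pvLabelsC guarantees)
def pvScanG (L : List (List Char)) : List Char → List Char
  | [] => []
  | c :: t =>
    match L.find? (fun l => l.isPrefixOf (c :: t)) with
    | some l => pvWrapC l ++ pvScanG L (t.drop (l.length - 1))
    | none => c :: pvScanG L t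
  termination_by cs => cs.length
  decreasing_by
  · simp only [List.length_drop, List.length_cons]; omega
  · simp

-- simple structural version of Python str.replace for a nonempty pattern o :: os
def pvRepl (o : Char) (os new : List Char) : List Char → List Char
  | [] => []
  | c :: t =>
    if (o :: os).isPrefixOf (c :: t) then new ++ pvRepl o os new (t.drop os.length)
    else c :: pvRepl o os new t
  termination_by cs => cs.length
  decreasing_by
  · simp only [List.length_drop, List.length_cons]; omega
  · simp

-- ---- decidable facts about the concrete label list ----
theorem labs_nodup : pvLabelsC.Nodup := by decide

theorem labs_ne_nil : ∀ l ∈ pvLabelsC, l ≠ [] := by decide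

-- no label (or nonempty suffix of a label) overlaps a DIFFERENT label
theorem labs_pair : ∀ l1 ∈ pvLabelsC, ∀ l2 ∈ pvLabelsC, l1 ≠ l2 →
    ∀ m, m < l2.length →
      l1.isPrefixOf (l2.drop m) = false ∧ (l2.drop m).isPrefixOf l1 = false := by decide

-- no nonempty suffix of a label matches the start of a wrapped label, in either direction
theorem labs_wrap : ∀ l1 ∈ pvLabelsC, ∀ l2 ∈ pvLabelsC,
    ∀ m, m < l2.length →
      (l2.drop m).isPrefixOf (pvWrapC l1) = false ∧ (pvWrapC l1).isPrefixOf (l2.drop m) = false := by decide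

-- a DIFFERENT label never matches at any offset inside a wrapped label
theorem labs_wrapk : ∀ l1 ∈ pvLabelsC, ∀ l2 ∈ pvLabelsC, l1 ≠ l2 →
    ∀ k, k < (pvWrapC l1).length →
      l2.isPrefixOf ((pvWrapC l1).drop k) = false ∧ ((pvWrapC l1).drop k).isPrefixOf l2 = false := by decide

theorem npre {a b : List Char} (h : a.isPrefixOf b = false) : ¬ a <+: b :=
  fun hp => by simp [List.isPrefixOf_iff_prefix.mpr hp] at h

-- ---- pvScanG / pvScan unfolding ----
theorem scanG_nil (L : List (List Char)) : pvScanG L [] = [] := by simp [pvScanG]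

theorem scanG_cons_some {L : List (List Char)} {c : Char} {t l : List Char}
    (h : L.find? (fun l => l.isPrefixOf (c :: t)) = some l) :
    pvScanG L (c :: t) = pvWrapC l ++ pvScanG L (t.drop (l.length - 1)) := by
  rw [pvScanG, h]

theorem scanG_cons_none {L : List (List Char)} {c : Char} {t : List Char}
    (h : L.find? (fun l => l.isPrefixOf (c :: t)) = none) :
    pvScanG L (c :: t) = c :: pvScanG L t := by
  rw [pvScanG, h]

theorem scan_eq_scanG : ∀ cs, pvScan cs = pvScanG pvLabelsC cs := by
  intro cs
  induction cs using pvScan.induct with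
  | case1 => simp [pvScan, scanG_nil]
  | case2 c t l h ih =>
      have hne := labs_ne_nil l (List.mem_of_find?_eq_some h)
      rw [pvScan, h, scanG_cons_some h]
      obtain ⟨o, os, rfl⟩ : ∃ o os, l = o :: os := by
        cases l with | nil => exact absurd rfl hne | cons o os => exact ⟨o, os, rfl⟩
      simpa [List.drop_succ_cons] using congrArg (pvWrapC (o :: os) ++ ·) ih
  | case3 c t h ih => rw [pvScan, h, scanG_cons_none h, ih]

-- ---- bridging PySem.Chars.replace to pvRepl ----
theorem replace_go_spec (o : Char) (os new : List Char) :
    ∀ fuel s acc, s.length ≤ fuel →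
      PySem.Chars.replace.go (o :: os) new fuel s acc = acc.reverse ++ pvRepl o os new s := by
  intro fuel
  induction fuel with
  | zero =>
      intro s acc hs
      have : s = [] := by cases s <;> simp_all
      subst this; simp [PySem.Chars.replace.go, pvRepl]
  | succ fuel ih =>
      intro s acc hs
      cases s with
      | nil => simp [PySem.Chars.replace.go, pvRepl]
      | cons c t =>
          rw [PySem.Chars.replace.go]
          by_cases hp : (o :: os).isPrefixOf (c :: t)
          · rw [if_pos hp]
            have hlen : (List.drop os.length t).length ≤ fuel := by
              simp only [List.length_drop]
              simp only [List.length_cons] at hs; omega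
            rw [show List.drop (o :: os).length (c :: t) = List.drop os.length t by
                  simp [List.drop_succ_cons]]
            rw [ih _ _ hlen, pvRepl, if_pos hp]
            simp
          · rw [if_neg hp]
            have hlen : t.length ≤ fuel := by simp only [List.length_cons] at hs; omega
            rw [ih _ _ hlen, pvRepl, if_neg hp]
            simp

theorem replace_eq_repl (s : List Char) (o : Char) (os new : List Char) :
    PySem.Chars.replace s (o :: os) new = pvRepl o os new s := by
  rw [PySem.Chars.replace, if_neg (by simp)]
  simpa using replace_go_spec o os new s.length s [] le_rfl

-- ---- pvRepl structure lemmas ----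
theorem repl_cons_pos {o : Char} {os : List Char} (new : List Char) {c : Char} {t : List Char}
    (h : (o :: os) <+: (c :: t)) :
    pvRepl o os new (c :: t) = new ++ pvRepl o os new (t.drop os.length) := by
  rw [pvRepl, if_pos (List.isPrefixOf_iff_prefix.mpr h)]

theorem repl_cons_neg {o : Char} {os : List Char} (new : List Char) {c : Char} {t : List Char}
    (h : ¬ (o :: os) <+: (c :: t)) :
    pvRepl o os new (c :: t) = c :: pvRepl o os new t := by
  rw [pvRepl, if_neg (fun hb => h (List.isPrefixOf_iff_prefix.mp hb))]

theorem repl_of_not_infix {o : Char} {os new : List Char} :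
    ∀ z, ¬ (o :: os) <:+: z → pvRepl o os new z = z := by
  intro z
  induction z with
  | nil => intro _; simp [pvRepl]
  | cons c t ih =>
      intro h
      rw [repl_cons_neg new (fun hp => h hp.isInfix), ih (fun hi => h (List.infix_cons hi))]

-- pvRepl passes over a block w in which the pattern can start nowhere
theorem repl_append {o : Char} {os new : List Char} :
    ∀ w t, (∀ k, k < w.length → ¬ (o :: os) <+: (w.drop k ++ t)) →
      pvRepl o os new (w ++ t) = w ++ pvRepl o os new t := by
  intro w
  induction w with
  | nil => intro t _; simp
  | cons c w' ih =>
      intro t h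
      have h0 : ¬ (o :: os) <+: (c :: (w' ++ t)) := by
        have := h 0 (by simp)
        simpa using this
      rw [List.cons_append, repl_cons_neg new h0,
          ih t (fun k hk => by simpa using h (k + 1) (by simpa using Nat.succ_lt_succ hk))]
      simp

-- ---- scan structure lemmas ----
-- if no label of L matches in the first n positions, the scan copies those n chars
theorem scanG_split (L : List (List Char)) :
    ∀ n s, n ≤ s.length →
      (∀ j, j < n → ∀ li ∈ L, ¬ li <+: s.drop j) →
      pvScanG L s = s.take n ++ pvScanG L (s.drop n) := by
  intro n
  induction n with
  | zero => intro s _ _; simp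
  | succ n ih =>
      intro s hn h
      cases s with
      | nil => simp at hn
      | cons c t =>
          have hnone : L.find? (fun l => l.isPrefixOf (c :: t)) = none := by
            rw [List.find?_eq_none]
            intro x hx hb
            exact h 0 (Nat.succ_pos n) x hx (by simpa using List.isPrefixOf_iff_prefix.mp hb)
          rw [scanG_cons_none hnone,
              ih t (by simpa using hn)
                (fun j hj li hli => by simpa using h (j + 1) (Nat.succ_lt_succ hj) li hli)]
          simp

-- prefix tests of (suffixes of) the new label are transparent to the old scan
theorem scanG_prefix_iff {L : List (List Char)} {l : List Char}
    (hl : l ∈ pvLabelsC) (hL : ∀ x ∈ L, x ∈ pvLabelsC) (hnot : l ∉ L) :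
    ∀ s m, m < l.length → (l.drop m <+: pvScanG L s ↔ l.drop m <+: s) := by
  intro s
  induction s with
  | nil => intro m hm; rw [scanG_nil]
  | cons c t ih =>
      intro m hm
      cases hfind : L.find? (fun l => l.isPrefixOf (c :: t)) with
      | some li =>
          have hmem : li ∈ L := List.mem_of_find?_eq_some hfind
          have hliC : li ∈ pvLabelsC := hL li hmem
          have hlipb := List.find?_some (p := fun l : List Char => l.isPrefixOf (c :: t)) hfind
          have hlip : li <+: (c :: t) := List.isPrefixOf_iff_prefix.mp hlipb
          have hne : li ≠ l := fun h => hnot (h ▸ hmem)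
          rw [scanG_cons_some hfind]
          constructor
          · intro hpre
            rcases List.prefix_or_prefix_of_prefix hpre (List.prefix_append _ _) with h1 | h1
            · exact absurd h1 (by simpa using npre (labs_wrap li hliC l hl m hm).1)
            · exact absurd h1 (by simpa using npre (labs_wrap li hliC l hl m hm).2)
          · intro hpre
            rcases List.prefix_or_prefix_of_prefix hlip hpre with h1 | h1
            · exact absurd h1 (by simpa using npre (labs_pair li hliC l hl hne m hm).1)
            · exact absurd h1 (by simpa using npre (labs_pair li hliC l hl hne m hm).2)
      | none =>
          rw [scanG_cons_none hfind]
          rw [List.drop_eq_getElem_cons hm, List.cons_prefix_cons, List.cons_prefix_cons]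
          by_cases hm1 : m + 1 < l.length
          · rw [ih (m + 1) hm1]
          · have : l.drop (m + 1) = [] := by
              rw [List.drop_eq_nil_iff]; omega
            simp [this]

-- ---- the master lemma: one more replace pass = scan with one more label ----
theorem master_aux {L : List (List Char)} {o : Char} {os : List Char}
    (hl : (o :: os) ∈ pvLabelsC) (hL : ∀ x ∈ L, x ∈ pvLabelsC) (hnot : (o :: os) ∉ L) :
    ∀ n s, s.length ≤ n →
      pvRepl o os (pvWrapC (o :: os)) (pvScanG L s) = pvScanG (L ++ [o :: os]) s := by
  intro n
  induction n with
  | zero =>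
      intro s hs
      have : s = [] := by cases s <;> simp_all
      subst this; simp [scanG_nil, pvRepl]
  | succ n ih =>
      intro s hs
      cases s with
      | nil => simp [scanG_nil, pvRepl]
      | cons c t =>
          simp only [List.length_cons] at hs
          cases hfind : L.find? (fun l => l.isPrefixOf (c :: t)) with
          | some li =>
              have hmem : li ∈ L := List.mem_of_find?_eq_some hfind
              have hliC : li ∈ pvLabelsC := hL li hmem
              have hne : li ≠ (o :: os) := fun h => hnot (h ▸ hmem)
              have hfind' : (L ++ [o :: os]).find? (fun l => l.isPrefixOf (c :: t)) = some li := by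
                rw [List.find?_append, hfind]; rfl
              rw [scanG_cons_some hfind, scanG_cons_some hfind']
              rw [repl_append _ _ (fun k hk hpre => by
                rcases List.prefix_or_prefix_of_prefix hpre (List.prefix_append _ _) with h1 | h1
                · exact absurd h1 (by simpa using npre (labs_wrapk li hliC (o :: os) hl hne k hk).1)
                · exact absurd h1 (by simpa using npre (labs_wrapk li hliC (o :: os) hl hne k hk).2))]
              rw [ih (t.drop (li.length - 1)) (by simp only [List.length_drop]; omega)]
          | none =>
              by_cases hp : (o :: os) <+: (c :: t)
              · -- the new label matches here: the old scan copies it verbatim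
                have hnolab : ∀ j, j < (o :: os).length → ∀ li ∈ L, ¬ li <+: (c :: t).drop j := by
                  intro j hj li hli hpre
                  have hliC : li ∈ pvLabelsC := hL li hli
                  have hne : li ≠ (o :: os) := fun h => hnot (h ▸ hli)
                  cases j with
                  | zero =>
                      exact List.find?_eq_none.mp hfind li hli
                        (List.isPrefixOf_iff_prefix.mpr (by simpa using hpre))
                  | succ j =>
                      have hdp : (o :: os).drop (j + 1) <+: (c :: t).drop (j + 1) :=
                        hp.drop (j + 1)
                      rcases List.prefix_or_prefix_of_prefix hpre hdp with h1 | h1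
                      · exact absurd h1 (by simpa using npre (labs_pair li hliC (o :: os) hl hne (j + 1) hj).1)
                      · exact absurd h1 (by simpa using npre (labs_pair li hliC (o :: os) hl hne (j + 1) hj).2)
                have hlen : (o :: os).length ≤ (c :: t).length := hp.length_le
                have hsplit := scanG_split L (o :: os).length (c :: t) hlen hnolab
                have htake : (c :: t).take (o :: os).length = (o :: os) := by
                  have := List.prefix_iff_eq_take.mp hp
                  exact this.symm
                rw [hsplit, htake]
                have hfind' : (L ++ [o :: os]).find? (fun l => l.isPrefixOf (c :: t)) = some (o :: os) := by
                  rw [List.find?_append, hfind]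
                  simp [List.isPrefixOf_iff_prefix.mpr hp]
                rw [scanG_cons_some hfind']
                rw [List.cons_append, repl_cons_pos _ (by simpa using List.prefix_append (o :: os) _)]
                have hdl : List.drop os.length (os ++ pvScanG L ((c :: t).drop (o :: os).length))
                    = pvScanG L ((c :: t).drop (o :: os).length) := by
                  simpa using List.drop_left os _
                rw [hdl]
                rw [ih ((c :: t).drop (o :: os).length)
                      (by simp only [List.length_drop, List.length_cons]; omega)]
                simp [List.drop_succ_cons]
              · -- the new label does not match here: both sides step one char
                have hfind' : (L ++ [o :: os]).find? (fun l => l.isPrefixOf (c :: t)) = none := by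
                  rw [List.find?_append, hfind]
                  cases hb : (o :: os).isPrefixOf (c :: t) with
                  | false => simp [List.find?_cons, hb]
                  | true => exact absurd (List.isPrefixOf_iff_prefix.mp hb) hp
                rw [scanG_cons_none hfind, scanG_cons_none hfind']
                have hnopre : ¬ (o :: os) <+: (c :: pvScanG L t) := by
                  intro hc
                  have := (scanG_prefix_iff hl hL hnot (c :: t) 0 (by simp)).mp
                    (by simpa [scanG_cons_none hfind] using hc)
                  exact hp (by simpa using this)
                rw [repl_cons_neg _ hnopre, ih t (by omega)]

-- one fold step over the remaining labels M, starting from the scan over the done labels L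
theorem fold_repl :
    ∀ (M L : List (List Char)), L ++ M = pvLabelsC →
      ∀ s, M.foldl
        (fun d l => if PySem.Chars.isIn l d then PySem.Chars.replace d l (pvWrapC l) else d)
        (pvScanG L s) = pvScanG pvLabelsC s := by
  intro M
  induction M with
  | nil => intro L hL s; simp only [List.foldl_nil]; rw [List.append_nil] at hL; rw [hL]
  | cons l M' ih =>
      intro L hL s
      have hlC : l ∈ pvLabelsC := by rw [← hL]; simp
      have hLC : ∀ x ∈ L, x ∈ pvLabelsC := by intro x hx; rw [← hL]; simp [hx]
      have hnot : l ∉ L := by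
        have hnd : (L ++ l :: M').Nodup := hL ▸ labs_nodup
        have hforall := (List.pairwise_cons.mp (List.nodup_middle.mp hnd)).1
        intro hx; exact hforall l (by simp [hx]) rfl
      obtain ⟨o, os, rfl⟩ : ∃ o os, l = o :: os := by
        cases l with
        | nil => exact absurd rfl (labs_ne_nil [] hlC)
        | cons o os => exact ⟨o, os, rfl⟩
      have hstep :
          (if PySem.Chars.isIn (o :: os) (pvScanG L s) then
            PySem.Chars.replace (pvScanG L s) (o :: os) (pvWrapC (o :: os)) else pvScanG L s)
          = pvScanG (L ++ [o :: os]) s := by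
        by_cases hin : PySem.Chars.isIn (o :: os) (pvScanG L s) = true
        · rw [if_pos hin, replace_eq_repl]
          exact master_aux hlC hLC hnot s.length s le_rfl
        · rw [if_neg hin]
          have hni : ¬ (o :: os) <:+: pvScanG L s := by
            intro hc
            exact hin ((PySem.Chars.isIn_iff_infix _ _).mpr hc)
          calc pvScanG L s = pvRepl o os (pvWrapC (o :: os)) (pvScanG L s) :=
                (repl_of_not_infix _ hni).symm
            _ = pvScanG (L ++ [o :: os]) s := master_aux hlC hLC hnot s.length s le_rfl
      rw [List.foldl_cons, hstep, ih (L ++ [o :: os]) (by simpa using hL) s]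

-- A's String-level fold equals the Chars-level fold
theorem A_toList (d : String) :
    (bold_description_labels d).toList
      = pvLabelsC.foldl
          (fun dc l => if PySem.Chars.isIn l dc then PySem.Chars.replace dc l (pvWrapC l) else dc)
          d.toList := by
  have gen : ∀ (ls : List String) (d : String),
      (ls.foldl (fun d l =>
          if PySem.Str.isIn l d then
            PySem.Str.replace d l ("<br /><strong>" ++ l ++ "</strong>")
          else d) d).toList
        = (ls.map String.toList).foldl
            (fun dc l => if PySem.Chars.isIn l dc then PySem.Chars.replace dc l (pvWrapC l) else dc)
            d.toList := by
    intro ls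
    induction ls with
    | nil => intro d; simp
    | cons l ls ih =>
        intro d
        simp only [List.foldl_cons, List.map_cons]
        rw [ih]
        congr 1
        by_cases hin : PySem.Str.isIn l d = true
        · rw [if_pos hin, if_pos (by rw [← PySem.Str.isIn_eq]; exact hin)]
          rw [PySem.Str.toList_replace]
          congr 1
          simp [pvWrapC, String.toList_append]
        · rw [if_neg hin, if_neg (by rw [← PySem.Str.isIn_eq]; exact hin)]
  have hmap : pvValidLabels.map String.toList = pvLabelsC := by decide
  rw [bold_description_labels, gen pvValidLabels d, hmap]

-- ===== VERDICT (by name: the statement is the Claim_ definition above) =====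
theorem bold_description_labels_spec : Claim_equal_bold_description_labels := by
  intro d _
  unfold Spec_bold_description_labels bold_description_labels_alt
  have h0 : ∀ cs : List Char, pvScanG [] cs = cs := by
    intro cs
    induction cs with
    | nil => simp [scanG_nil]
    | cons c t ih => rw [scanG_cons_none (by simp), ih]
  have h1 : (bold_description_labels d).toList = pvScan d.toList := by
    rw [A_toList d, scan_eq_scanG]
    have h2 := fold_repl pvLabelsC [] rfl d.toList
    rw [h0 d.toList] at h2
    exact h2
  calc bold_description_labels d = String.ofList (bold_description_labels d).toList := by simp
    _ = String.ofList (pvScan d.toList) := by rw [h1]
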